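-- pv_equiv track=rewrite | github.com/jonah-sdm/sdm-marketbeat | services/importers_exporter.py | get_best_email
-- ===== SOURCE A (Python) =====
-- def get_best_email(emails):
--     if not emails:
--         return "", "unknown"
--     priority = ["sales", "bizdev", "info", "support",
--                 "accounting", "ap", "treasury", "finance"]
--     for keyword in priority:
--         for email in emails:
--             if keyword in email.lower():
--                 return email, keyword
--     return emails[0], "unknown"
-- ===== SOURCE B (Python) =====
-- def get_best_email(emails):
--     if not emails:
--         return "", "unknown"
--     priority = ["sales", "bizdev", "info", "support",
--                 "accounting", "ap", "treasury", "finance"]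
--     best_index, best_email, best_keyword = len(priority), emails[0], "unknown"
--     for email in emails:
--         lower = email.lower()
--         for idx, kw in enumerate(priority):
--             if kw in lower:
--                 if idx < best_index:
--                     best_index, best_email, best_keyword = idx, email, kw
--                 break
--     return best_email, best_keyword
-- ===== Notes on version B (the rewrite author's own statement) =====
-- stated objective: alternative
-- what changed: Replaced A's keyword-major nested scan (restart the whole email list for every keyword) by a single email-major pass that keeps the best (lowest) priority index seen so far.
import Mathlib
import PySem

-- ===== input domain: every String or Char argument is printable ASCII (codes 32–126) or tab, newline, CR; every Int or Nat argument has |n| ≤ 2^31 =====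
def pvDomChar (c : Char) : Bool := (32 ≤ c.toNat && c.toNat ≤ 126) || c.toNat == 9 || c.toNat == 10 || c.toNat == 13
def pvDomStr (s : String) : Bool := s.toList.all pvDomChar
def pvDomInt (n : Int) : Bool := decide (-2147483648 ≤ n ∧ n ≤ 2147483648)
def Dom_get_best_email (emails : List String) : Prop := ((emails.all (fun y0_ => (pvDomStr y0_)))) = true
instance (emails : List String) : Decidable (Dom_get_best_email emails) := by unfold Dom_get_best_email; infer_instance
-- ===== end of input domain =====

-- B replaces A's keyword-major nested scan by a single email-major pass tracking the best priority index; same cost, return values proved equal.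

def pvPriority : List String :=
  ["sales", "bizdev", "info", "support", "accounting", "ap", "treasury", "finance"]

-- ===== PORT A =====
-- inner loop: 'for email in emails: if keyword in email.lower(): return email'
def pvAScan (kw : String) : List String → Option String
  | [] => none
  | e :: rest => if PySem.Str.isIn kw (PySem.Str.lower e) then some e else pvAScan kw rest

-- outer loop: 'for keyword in priority: …'
def pvAOuter (emails : List String) : List String → Option (String × String)
  | [] => none
  | kw :: ks =>
    match pvAScan kw emails with
    | some e => some (e, kw)
    | none => pvAOuter emails ks

def get_best_email (emails : List String) : String × String :=
  match emails with
  | [] => ("", "unknown")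
  | e0 :: _ =>
    match pvAOuter emails pvPriority with
    | some r => r
    | none => (e0, "unknown")

-- ===== PORT B =====
-- inner loop: 'for idx, kw in enumerate(priority): if kw in lower: … break'
def pvFirstIdx (low : String) : List String → Option (Nat × String)
  | [] => none
  | kw :: ks =>
    if PySem.Str.isIn kw low then some (0, kw)
    else (pvFirstIdx low ks).map (fun p => (p.1 + 1, p.2))

-- one step of the email-major pass: update best on a strictly smaller priority index
def pvBStep (ks : List String) (b : Nat × String × String) (e : String) : Nat × String × String :=
  match pvFirstIdx (PySem.Str.lower e) ks with
  | some (i, kw) => if i < b.1 then (i, e, kw) else b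
  | none => b

def get_best_email_alt (emails : List String) : String × String :=
  match emails with
  | [] => ("", "unknown")
  | e0 :: _ =>
    let r := emails.foldl (pvBStep pvPriority) (pvPriority.length, e0, "unknown")
    (r.2.1, r.2.2)

-- ===== PRECONDITION & SPEC =====
def Spec_get_best_email (emails : List String) (out : String × String) : Prop := out = get_best_email_alt emails
instance (emails : List String) (out : String × String) : Decidable (Spec_get_best_email emails out) := by unfold Spec_get_best_email; infer_instance

-- ===== CLAIM (what is proved, stated in full; the proofs are below) =====
def Claim_equal_get_best_email : Prop := ∀ (emails : List String), Dom_get_best_email emails → Spec_get_best_email emails (get_best_email emails)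

-- ===== LEMMAS AND PROOFS =====

-- a best of index 0 can never be improved, so the fold keeps it
theorem pv_zero_stable (ks : List String) (emails : List String) (p : String × String) :
    List.foldl (pvBStep ks) (0, p) emails = (0, p) := by
  induction emails with
  | nil => rfl
  | cons e rest ih =>
    have hstep : pvBStep ks (0, p) e = (0, p) := by
      unfold pvBStep
      cases h : pvFirstIdx (PySem.Str.lower e) ks with
      | none => rfl
      | some q => simp
    simp [List.foldl, hstep, ih]

-- with an empty keyword list the state never changes
theorem pv_nil_fold (emails : List String) (b : Nat × String × String) :
    List.foldl (pvBStep []) b emails = b := by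
  induction emails generalizing b with
  | nil => rfl
  | cons e rest ih => simpa [List.foldl, pvBStep, pvFirstIdx] using ih b

-- dropping the head keyword, when no email matches it, shifts every index by one
theorem pv_shift (k : String) (ks : List String) (emails : List String)
    (n : Nat) (p : String × String)
    (hmiss : ∀ e ∈ emails, PySem.Str.isIn k (PySem.Str.lower e) = false) :
    List.foldl (pvBStep (k :: ks)) (n + 1, p) emails =
      (fun s => (s.1 + 1, s.2)) (List.foldl (pvBStep ks) (n, p) emails) := by
  induction emails generalizing n p with
  | nil => rfl
  | cons e rest ih =>
    have hk : PySem.Str.isIn k (PySem.Str.lower e) = false := hmiss e (by simp)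
    have hrest : ∀ e' ∈ rest, PySem.Str.isIn k (PySem.Str.lower e') = false :=
      fun e' he' => hmiss e' (by simp [he'])
    simp only [List.foldl]
    have hfi : pvFirstIdx (PySem.Str.lower e) (k :: ks) =
        (pvFirstIdx (PySem.Str.lower e) ks).map (fun p => (p.1 + 1, p.2)) := by
      show (if PySem.Str.isIn k (PySem.Str.lower e) = true then some (0, k)
            else (pvFirstIdx (PySem.Str.lower e) ks).map (fun p => (p.1 + 1, p.2))) = _
      rw [hk]
      simp
    cases h : pvFirstIdx (PySem.Str.lower e) ks with
    | none =>
      have h1 : pvBStep (k :: ks) (n + 1, p) e = (n + 1, p) := by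
        simp [pvBStep, hfi, h]
      have h2 : pvBStep ks (n, p) e = (n, p) := by simp [pvBStep, h]
      rw [h1, h2]; exact ih n p hrest
    | some q =>
      obtain ⟨j, kw⟩ := q
      by_cases hlt : j < n
      · have h1 : pvBStep (k :: ks) (n + 1, p) e = (j + 1, e, kw) := by
          simp [pvBStep, hfi, h, Nat.succ_lt_succ hlt]
        have h2 : pvBStep ks (n, p) e = (j, e, kw) := by simp [pvBStep, h, hlt]
        rw [h1, h2]; exact ih j (e, kw) hrest
      · have h1 : pvBStep (k :: ks) (n + 1, p) e = (n + 1, p) := by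
          simp [pvBStep, hfi, h]
          omega
        have h2 : pvBStep ks (n, p) e = (n, p) := by simp [pvBStep, h, hlt]
        rw [h1, h2]; exact ih n p hrest

-- if some email matches the head keyword, the pass ends in state (0, first such email, k)
theorem pv_case_hit (k : String) (ks : List String) (emails : List String)
    (e : String) (b : Nat × String × String) (hb : 1 ≤ b.1)
    (hscan : pvAScan k emails = some e) :
    List.foldl (pvBStep (k :: ks)) b emails = (0, e, k) := by
  induction emails generalizing b with
  | nil => simp [pvAScan] at hscan
  | cons e' rest ih =>
    by_cases hk : PySem.Str.isIn k (PySem.Str.lower e') = true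
    · have he : e = e' := by
        have h2 := hscan
        unfold pvAScan at h2
        rw [hk] at h2
        simp at h2
        exact h2.symm
      have hstep : pvBStep (k :: ks) b e' = (0, e', k) := by
        have hfi : pvFirstIdx (PySem.Str.lower e') (k :: ks) = some (0, k) := by
          show (if PySem.Str.isIn k (PySem.Str.lower e') = true then some (0, k)
                else (pvFirstIdx (PySem.Str.lower e') ks).map (fun p => (p.1 + 1, p.2))) = _
          rw [hk]
          simp
        simp [pvBStep, hfi]
        omega
      subst he
      simp [List.foldl, hstep, pv_zero_stable]
    · have hk' : PySem.Str.isIn k (PySem.Str.lower e') = false := by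
        simpa using hk
      have hscan' : pvAScan k rest = some e := by
        have h2 := hscan
        unfold pvAScan at h2
        rw [hk'] at h2
        simpa using h2
      simp only [List.foldl]
      have hfi : pvFirstIdx (PySem.Str.lower e') (k :: ks) =
          (pvFirstIdx (PySem.Str.lower e') ks).map (fun p => (p.1 + 1, p.2)) := by
        show (if PySem.Str.isIn k (PySem.Str.lower e') = true then some (0, k)
              else (pvFirstIdx (PySem.Str.lower e') ks).map (fun p => (p.1 + 1, p.2))) = _
        rw [hk']
        simp
      cases h : pvFirstIdx (PySem.Str.lower e') ks with
      | none =>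
        have hstep : pvBStep (k :: ks) b e' = b := by simp [pvBStep, hfi, h]
        rw [hstep]; exact ih b hb hscan'
      | some q =>
        obtain ⟨j, kw⟩ := q
        by_cases hlt : j + 1 < b.1
        · have hstep : pvBStep (k :: ks) b e' = (j + 1, e', kw) := by
            simp [pvBStep, hfi, h, hlt]
          rw [hstep]; exact ih (j + 1, e', kw) (by omega) hscan'
        · have hstep : pvBStep (k :: ks) b e' = b := by
            simp [pvBStep, hfi, h]
            omega
          rw [hstep]; exact ih b hb hscan'

-- if no email matches k, the scan says so element-wise
theorem pv_scan_none (k : String) (emails : List String)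
    (h : pvAScan k emails = none) :
    ∀ e ∈ emails, PySem.Str.isIn k (PySem.Str.lower e) = false := by
  induction emails with
  | nil => simp
  | cons e' rest ih =>
    by_cases hk : PySem.Str.isIn k (PySem.Str.lower e') = true
    · unfold pvAScan at h
      rw [hk] at h
      simp at h
    · intro e he
      have hk' : PySem.Str.isIn k (PySem.Str.lower e') = false := by simpa using hk
      rcases List.mem_cons.mp he with rfl | he'
      · exact hk'
      · refine ih ?_ e he'
        have h2 := h
        unfold pvAScan at h2
        rw [hk'] at h2
        simpa using h2

-- the email-major pass computes exactly what A's keyword-major scan returns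
theorem pv_main (ks : List String) (emails : List String) (p : String × String) :
    (List.foldl (pvBStep ks) (ks.length, p) emails).2 = (pvAOuter emails ks).getD p := by
  induction ks with
  | nil => simp [pv_nil_fold, pvAOuter]
  | cons k ks ih =>
    cases hscan : pvAScan k emails with
    | some e =>
      simp only [List.length_cons]
      rw [pv_case_hit k ks emails e (ks.length + 1, p) (by omega) hscan]
      simp [pvAOuter, hscan]
    | none =>
      have hmiss := pv_scan_none k emails hscan
      have := pv_shift k ks emails ks.length p hmiss
      simp only [List.length_cons]
      rw [this]
      simpa [pvAOuter, hscan] using ih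

-- ===== VERDICT (by name: the statement is the Claim_ definition above) =====
theorem get_best_email_spec : Claim_equal_get_best_email := by
  intro emails _
  unfold Spec_get_best_email get_best_email get_best_email_alt
  cases emails with
  | nil => rfl
  | cons e0 rest =>
    have h := pv_main pvPriority (e0 :: rest) (e0, "unknown")
    show (match pvAOuter (e0 :: rest) pvPriority with
          | some r => r
          | none => (e0, "unknown")) =
        ((List.foldl (pvBStep pvPriority) (pvPriority.length, e0, "unknown") (e0 :: rest)).2.1,
         (List.foldl (pvBStep pvPriority) (pvPriority.length, e0, "unknown") (e0 :: rest)).2.2)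
    rw [Prod.mk.eta, h]
    cases pvAOuter (e0 :: rest) pvPriority <;> rfl
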